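-- pv_equiv track=rewrite | github.com/AndresLesmesg/file-system-storage | app/src/utils.py | get_next_file
-- ===== SOURCE A (Python) =====
-- def get_next_file(data, filename):
--     file = False
--     for item in data:
--         if file and (item[3] != 'undefined' and item[3] != 'hidden'):
--             return item[1]
--         if item[1] == filename:
--             file = True
--     return None
-- ===== SOURCE B (Python) =====
-- def get_next_file(data, filename):
--     # Backward pass (right fold): for each suffix keep
--     #   first_valid = name of the first non-undefined, non-hidden item in the suffix
--     #   answer      = result for that suffix
--     # A match at the head of a suffix makes the answer the first valid name of the rest;
--     # the leftmost match is processed last and therefore wins, as in a forward scan.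
--     first_valid = None
--     answer = None
--     for item in reversed(data):
--         if item[1] == filename:
--             answer = first_valid
--         if item[3] != 'undefined' and item[3] != 'hidden':
--             first_valid = item[1]
--     return answer
-- ===== Notes on version B (the rewrite author's own statement) =====
-- stated objective: alternative
-- what changed: Replaces A's forward scan with a check-then-set boolean flag and early return by a single backward pass (a right fold) that maintains a pair (first valid name of the current suffix, answer for that suffix) and never returns early.
import Mathlib
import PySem

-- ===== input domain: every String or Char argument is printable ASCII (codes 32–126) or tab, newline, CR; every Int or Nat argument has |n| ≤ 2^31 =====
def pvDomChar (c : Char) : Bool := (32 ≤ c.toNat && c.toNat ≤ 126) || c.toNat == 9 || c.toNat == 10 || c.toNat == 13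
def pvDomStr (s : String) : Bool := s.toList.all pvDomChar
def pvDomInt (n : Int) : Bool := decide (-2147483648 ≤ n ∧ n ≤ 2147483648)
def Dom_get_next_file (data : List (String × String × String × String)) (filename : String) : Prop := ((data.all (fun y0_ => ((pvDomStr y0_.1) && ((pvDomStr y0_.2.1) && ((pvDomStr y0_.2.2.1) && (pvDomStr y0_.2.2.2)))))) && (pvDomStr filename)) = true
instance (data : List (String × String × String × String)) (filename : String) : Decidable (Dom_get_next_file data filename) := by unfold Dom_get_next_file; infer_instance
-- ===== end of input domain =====

-- B replaces A's forward flag-scan with a single backward pass (right fold) over the data,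
-- maintaining (first valid name of the suffix, answer for the suffix): alternative decomposition, same cost.

-- ===== PORT A =====
-- A's for-loop with the `file` flag and early return, as structural recursion over the same state
def get_next_file_go (filename : String) : List (String × String × String × String) → Bool → Option String
  | [], _ => none
  | item :: rest, file =>
    if file ∧ item.2.2.2 ≠ "undefined" ∧ item.2.2.2 ≠ "hidden" then some item.2.1
    else get_next_file_go filename rest (if item.2.1 = filename then true else file)

def get_next_file (data : List (String × String × String × String)) (filename : String) : Option String :=
  get_next_file_go filename data false

-- ===== PORT B =====
-- B's loop `for item in reversed(data)` updating (first_valid, answer), as a foldl over data.reverse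
def get_next_file_alt (data : List (String × String × String × String)) (filename : String) : Option String :=
  (data.reverse.foldl (fun (st : Option String × Option String) item =>
      let answer := if item.2.1 = filename then st.1 else st.2
      let first_valid := if item.2.2.2 ≠ "undefined" ∧ item.2.2.2 ≠ "hidden" then some item.2.1 else st.1
      (first_valid, answer)) (none, none)).2

-- ===== PRECONDITION & SPEC =====
def Spec_get_next_file (data : List (String × String × String × String)) (filename : String) (out : Option String) : Prop := out = get_next_file_alt data filename
instance (data : List (String × String × String × String)) (filename : String) (out : Option String) : Decidable (Spec_get_next_file data filename out) := by unfold Spec_get_next_file; infer_instance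

-- ===== CLAIM (what is proved, stated in full; the proofs are below) =====
def Claim_equal_get_next_file : Prop := ∀ (data : List (String × String × String × String)) (filename : String), Dom_get_next_file data filename → Spec_get_next_file data filename (get_next_file data filename)

-- ===== LEMMAS AND PROOFS =====

-- B's fold step
def pvStep (filename : String) (st : Option String × Option String) (item : String × String × String × String) : Option String × Option String :=
  (if item.2.2.2 ≠ "undefined" ∧ item.2.2.2 ≠ "hidden" then some item.2.1 else st.1,
   if item.2.1 = filename then st.1 else st.2)

theorem pvAlt_step_eq (filename : String) : (fun (st : Option String × Option String) item =>
      let answer := if item.2.1 = filename then st.1 else st.2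
      let first_valid := if item.2.2.2 ≠ "undefined" ∧ item.2.2.2 ≠ "hidden" then some item.2.1 else st.1
      (first_valid, answer)) = pvStep filename := rfl

-- A with the flag already set returns the first valid name of the list
theorem pv_go_true (filename : String) (l : List (String × String × String × String)) :
    get_next_file_go filename l true = (l.foldr (fun item st => pvStep filename st item) (none, none)).1 := by
  induction l with
  | nil => rfl
  | cons item rest ih =>
    simp only [get_next_file_go, List.foldr_cons, pvStep, true_and]
    split_ifs with h
    · rfl
    · exact ih
    · exact ih

theorem pv_go_foldr (filename : String) (l : List (String × String × String × String)) :
    get_next_file_go filename l false = (l.foldr (fun item st => pvStep filename st item) (none, none)).2 := by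
  induction l with
  | nil => rfl
  | cons item rest ih =>
    simp only [get_next_file_go, List.foldr_cons, false_and, if_false]
    by_cases h : item.2.1 = filename
    · simp [h, pvStep, pv_go_true]
    · simp [h, pvStep, ih]

theorem get_next_file_spec : Claim_equal_get_next_file := by
  intro data filename _
  unfold Spec_get_next_file get_next_file get_next_file_alt
  rw [pvAlt_step_eq, List.foldl_reverse]
  exact pv_go_foldr filename data
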